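-- pv_equiv track=rewrite | github.com/JingMatrix/IntegrityKit | pyintegrity/patch.py | _remove_package_section
-- ===== SOURCE A (Python) =====
-- def _remove_package_section(content, package_name):
--     """Removes an entire package section from the content."""
--     lines = content.splitlines()
--     new_lines = []
--     in_section_to_remove = False
--
--     for line in lines:
--         stripped_line = line.strip()
--         if stripped_line == f"[{package_name}]":
--             in_section_to_remove = True
--             continue
--         elif stripped_line.startswith('[') and stripped_line.endswith(']'):
--             in_section_to_remove = False
--
--         if not in_section_to_remove:
--             new_lines.append(line)
--
--     return '\n'.join(new_lines)
-- ===== SOURCE B (Python) =====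
-- def _remove_package_section(content, package_name):
--     """Removes an entire package section from the content."""
--     target = f"[{package_name}]"
--     preamble = []
--     groups = []  # (header_line, body_lines) in order of appearance
--     for line in content.splitlines():
--         s = line.strip()
--         if s.startswith('[') and s.endswith(']'):
--             groups.append((line, []))
--         elif groups:
--             groups[-1][1].append(line)
--         else:
--             preamble.append(line)
--     kept = list(preamble)
--     for header, body in groups:
--         if header.strip() != target:
--             kept.append(header)
--             kept.extend(body)
--     return '\n'.join(kept)
-- ===== Notes on version B (the rewrite author's own statement) =====
-- stated objective: alternative
-- what changed: Replaces A's single toggling-boolean scan with a partition of the lines into a preamble plus header-led (header, body) groups, then a filter pass that drops groups whose header matches [package_name] and rejoins the rest.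
import Mathlib
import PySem

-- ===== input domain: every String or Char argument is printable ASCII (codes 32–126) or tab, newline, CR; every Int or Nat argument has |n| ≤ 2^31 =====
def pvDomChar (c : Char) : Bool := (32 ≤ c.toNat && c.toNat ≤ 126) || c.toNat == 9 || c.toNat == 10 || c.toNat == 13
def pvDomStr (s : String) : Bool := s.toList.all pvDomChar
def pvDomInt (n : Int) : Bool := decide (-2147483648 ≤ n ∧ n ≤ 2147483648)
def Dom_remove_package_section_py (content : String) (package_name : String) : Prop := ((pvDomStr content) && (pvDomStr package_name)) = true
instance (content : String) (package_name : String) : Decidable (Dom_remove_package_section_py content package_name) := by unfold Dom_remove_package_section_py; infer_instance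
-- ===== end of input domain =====

-- B replaces A's toggling-boolean line scan by a partition into preamble + header-led groups
-- followed by a filter-and-rejoin pass (objective: alternative decomposition, same cost).


-- ===== PORT A =====
-- A-side helper: the body of A's single for-loop (state = (new_lines, in_section_to_remove)).
def rpsStepA (target : List Char) (st : List (List Char) × Bool) (line : List Char) :
    List (List Char) × Bool :=
  let s := PySem.Chars.strip line
  if s = target then (st.1, true)          -- matched header: 'continue' with flag set
  else
    let st' := if PySem.Chars.startswith s ['['] && PySem.Chars.endswith s [']']
               then (st.1, false) else st
    if st'.2 then st' else (st'.1 ++ [line], st'.2)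

def remove_package_section_py (content : String) (package_name : String) : String :=
  let target : List Char := '[' :: (package_name.toList ++ [']'])   -- f"[{package_name}]"
  let lines := PySem.Chars.splitlines content.toList
  let st := lines.foldl (rpsStepA target) ([], false)
  String.ofList (PySem.Chars.join ['\n'] st.1)

-- ===== PORT B =====
-- B-side helper: groups[-1][1].append(line)
def rpsUpdLast (gs : List (List Char × List (List Char))) (line : List Char) :
    List (List Char × List (List Char)) :=
  match gs with
  | [] => []
  | [g] => [(g.1, g.2 ++ [line])]
  | g :: rest => g :: rpsUpdLast rest line

-- B-side helper: the partitioning loop body (state = (preamble, groups)).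
def rpsStepB (st : List (List Char) × List (List Char × List (List Char))) (line : List Char) :
    List (List Char) × List (List Char × List (List Char)) :=
  let s := PySem.Chars.strip line
  if PySem.Chars.startswith s ['['] && PySem.Chars.endswith s [']'] then
    (st.1, st.2 ++ [(line, [])])
  else if st.2 ≠ [] then (st.1, rpsUpdLast st.2 line)
  else (st.1 ++ [line], st.2)

-- B-side helper: the filter-and-collect pass over the groups.
def rpsKept (target : List Char) (pre : List (List Char))
    (gs : List (List Char × List (List Char))) : List (List Char) :=
  gs.foldl (fun acc g => if PySem.Chars.strip g.1 ≠ target then acc ++ g.1 :: g.2 else acc) pre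

def remove_package_section_py_alt (content : String) (package_name : String) : String :=
  let target : List Char := '[' :: (package_name.toList ++ [']'])   -- f"[{package_name}]"
  let st := (PySem.Chars.splitlines content.toList).foldl rpsStepB ([], [])
  String.ofList (PySem.Chars.join ['\n'] (rpsKept target st.1 st.2))

-- ===== PRECONDITION & SPEC =====
def Spec_remove_package_section_py (content : String) (package_name : String) (out : String) : Prop := out = remove_package_section_py_alt content package_name
instance (content : String) (package_name : String) (out : String) : Decidable (Spec_remove_package_section_py content package_name out) := by unfold Spec_remove_package_section_py; infer_instance

-- ===== CLAIM (what is proved, stated in full; the proofs are below) =====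
def Claim_equal_remove_package_section_py : Prop := ∀ (content : String) (package_name : String), Dom_remove_package_section_py content package_name → Spec_remove_package_section_py content package_name (remove_package_section_py content package_name)

-- ===== LEMMAS AND PROOFS =====

-- the flag A maintains, read off from B's group list: set iff the last header so far matched
def rpsFlag (target : List Char) (gs : List (List Char × List (List Char))) : Bool :=
  match gs.getLast? with
  | none => false
  | some g => decide (PySem.Chars.strip g.1 = target)

lemma rpsKept_concat (target : List Char) (pre : List (List Char)) (gs : List (List Char × List (List Char))) (g : List Char × List (List Char)) :
    rpsKept target pre (gs ++ [g]) =
      if PySem.Chars.strip g.1 ≠ target then rpsKept target pre gs ++ g.1 :: g.2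
      else rpsKept target pre gs := by
  simp [rpsKept, List.foldl_append]

lemma rpsUpdLast_concat (gs : List (List Char × List (List Char))) (g : List Char × List (List Char)) (line : List Char) :
    rpsUpdLast (gs ++ [g]) line = gs ++ [(g.1, g.2 ++ [line])] := by
  induction gs with
  | nil => rfl
  | cons h t ih =>
    cases t with
    | nil => simp [rpsUpdLast]
    | cons h2 t2 => simpa [rpsUpdLast] using ih

lemma rps_target_header (pkg : List Char) :
    PySem.Chars.startswith ('[' :: (pkg ++ [']'])) ['['] = true ∧
    PySem.Chars.endswith ('[' :: (pkg ++ [']'])) [']'] = true := by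
  constructor
  · rw [PySem.Chars.startswith_iff]; exact ⟨pkg ++ [']'], rfl⟩
  · rw [PySem.Chars.endswith_iff]; exact ⟨'[' :: pkg, by simp⟩

lemma rps_loop (target : List Char)
    (hts : PySem.Chars.startswith target ['['] = true)
    (hte : PySem.Chars.endswith target [']'] = true)
    (lines : List (List Char)) :
    ∀ (accA : List (List Char)) (flag : Bool)
      (pre : List (List Char)) (gs : List (List Char × List (List Char))),
      accA = rpsKept target pre gs → flag = rpsFlag target gs →
      (lines.foldl (rpsStepA target) (accA, flag)).1 =
        rpsKept target ((lines.foldl rpsStepB (pre, gs)).1)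
                       ((lines.foldl rpsStepB (pre, gs)).2) := by
  induction lines with
  | nil => intro accA flag pre gs h1 h2; simpa using h1
  | cons line rest ih =>
    intro accA flag pre gs h1 h2
    simp only [List.foldl_cons]
    by_cases hs : PySem.Chars.strip line = target
    · -- matched header: A sets the flag, B opens a group that will be dropped
      have hA : rpsStepA target (accA, flag) line = (accA, true) := by
        simp [rpsStepA, hs]
      have hB : rpsStepB (pre, gs) line = (pre, gs ++ [(line, [])]) := by
        simp [rpsStepB, hs, hts, hte]
      rw [hA, hB]
      apply ih
      · rw [h1, rpsKept_concat]; simp [hs]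
      · simp [rpsFlag, hs]
    · by_cases hh : (PySem.Chars.startswith (PySem.Chars.strip line) ['['] &&
                     PySem.Chars.endswith (PySem.Chars.strip line) [']']) = true
      · -- non-matching header: A clears the flag and keeps the line, B opens a kept group
        have hA : rpsStepA target (accA, flag) line = (accA ++ [line], false) := by
          simp [rpsStepA, hs, hh]
        have hB : rpsStepB (pre, gs) line = (pre, gs ++ [(line, [])]) := by
          simp [rpsStepB, hh]
        rw [hA, hB]
        apply ih
        · rw [h1, rpsKept_concat]; simp [hs]
        · simp [rpsFlag, hs]
      · -- ordinary line
        rcases List.eq_nil_or_concat gs with hgs | ⟨gs₀, g, rfl⟩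
        · -- still in the preamble: flag is false, both keep the line
          subst hgs
          have hf : flag = false := by simpa [rpsFlag] using h2
          have hA : rpsStepA target (accA, flag) line = (accA ++ [line], false) := by
            simp [rpsStepA, hs, hh, hf]
          have hB : rpsStepB (pre, []) line = (pre ++ [line], []) := by
            simp [rpsStepB, hh]
          rw [hA, hB]
          apply ih
          · rw [h1]; simp [rpsKept]
          · simp [rpsFlag]
        · -- inside a group: B appends to the last group's body
          simp only [List.concat_eq_append] at h1 h2 ⊢
          have hf : flag = decide (PySem.Chars.strip g.1 = target) := by
            simpa [rpsFlag, List.getLast?_concat] using h2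
          have hB : rpsStepB (pre, gs₀ ++ [g]) line =
              (pre, gs₀ ++ [(g.1, g.2 ++ [line])]) := by
            simp [rpsStepB, hh, rpsUpdLast_concat]
          by_cases hg : PySem.Chars.strip g.1 = target
          · -- current section is being removed: A drops the line, the group is filtered out
            have hA : rpsStepA target (accA, flag) line = (accA, flag) := by
              simp [rpsStepA, hs, hh, hf, hg]
            rw [hA, hB]
            apply ih
            · rw [h1, rpsKept_concat, rpsKept_concat]; simp [hg]
            · simp [rpsFlag, hg, hf]
          · -- current section is kept: both keep the line, at the end of the same group
            have hA : rpsStepA target (accA, flag) line = (accA ++ [line], flag) := by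
              simp [rpsStepA, hs, hh, hf, hg]
            rw [hA, hB]
            apply ih
            · rw [h1, rpsKept_concat, rpsKept_concat]; simp [hg]
            · simp [rpsFlag, hg, hf]

-- ===== VERDICT (by name: the statement is the Claim_ definition above) =====
theorem remove_package_section_py_spec : Claim_equal_remove_package_section_py := by
  intro content package_name _
  unfold Spec_remove_package_section_py remove_package_section_py remove_package_section_py_alt
  obtain ⟨hts, hte⟩ := rps_target_header package_name.toList
  have h := rps_loop ('[' :: (package_name.toList ++ [']'])) hts hte
      (PySem.Chars.splitlines content.toList) [] false [] [] (by simp [rpsKept]) (by simp [rpsFlag])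
  simp only []
  rw [h]
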